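-- pv_equiv track=rewrite | github.com/gaalci/uids | scripts/extract_names.py | bucket_by_letter
-- ===== SOURCE A (Python) =====
-- import os, json, string
--
-- DIGITS = [str(d) for d in range(10)]
--
-- def bucket_by_letter(pairs):
--     """Return dict containing A-Z and 0-9 keys, e.g. { 'A': {...}, '0': {...} }.
--
--     Names whose first character is a letter (A-Z) go to the corresponding
--     uppercase bucket. Names starting with a digit 0-9 go to the corresponding
--     digit bucket. Other leading characters are ignored.
--     """
--     buckets = {L: {} for L in string.ascii_uppercase}
--     # add digit buckets
--     for d in DIGITS:
--         buckets[d] = {}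
--
--     for name, uid in pairs:
--         if not name:
--             continue
--         first = name[0].upper()
--         # if first is a digit (0-9) it will be in buckets as a string
--         if first in buckets:
--             buckets[first][name] = uid
--     return buckets
-- ===== SOURCE B (Python) =====
-- import string
--
-- def bucket_by_letter(pairs):
--     """Bucket-major rebuild: one dict comprehension per key A-Z0-9, each
--     selecting its own pairs, instead of A's single pass dispatching into a
--     pre-seeded skeleton."""
--     return {k: {name: uid for name, uid in pairs if name[:1].upper() == k}
--             for k in string.ascii_uppercase + string.digits}
-- ===== Notes on version B (the rewrite author's own statement) =====
-- stated objective: simpler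
-- what changed: A makes one pass over pairs dispatching each into a mutable pre-seeded skeleton of 36 buckets; B rebuilds the result bucket-major as a single nested dict comprehension, one filtering comprehension per key A-Z/0-9, with no skeleton, no mutation and no membership test.
import Mathlib
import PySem

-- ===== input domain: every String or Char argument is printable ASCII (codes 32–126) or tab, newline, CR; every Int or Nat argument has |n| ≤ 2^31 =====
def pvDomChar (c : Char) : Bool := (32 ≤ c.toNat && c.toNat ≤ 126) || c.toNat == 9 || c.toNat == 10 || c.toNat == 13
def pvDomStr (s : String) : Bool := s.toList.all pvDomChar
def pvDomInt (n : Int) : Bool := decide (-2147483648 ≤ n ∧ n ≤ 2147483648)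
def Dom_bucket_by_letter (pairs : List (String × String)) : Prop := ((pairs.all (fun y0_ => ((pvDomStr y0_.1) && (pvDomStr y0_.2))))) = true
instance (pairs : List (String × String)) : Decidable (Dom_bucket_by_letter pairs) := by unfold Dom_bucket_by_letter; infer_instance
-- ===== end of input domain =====

-- B replaces A's single dispatching pass into a pre-seeded skeleton by one comprehension per
-- bucket key (bucket-major rebuild); objective: a simpler, structurally different decomposition.

-- ===== PORT A =====
-- string.ascii_uppercase, iterated as 1-char strings
def pvUpperKeys : List String := ("ABCDEFGHIJKLMNOPQRSTUVWXYZ".toList).map (fun c => String.ofList [c])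
-- DIGITS = [str(d) for d in range(10)]
def pvDigitKeys : List String := (PySem.List.pyRange 0 10 1).map (fun d => PySem.Int.toStr d)

-- the body of A's `for name, uid in pairs` loop
def pvStepA (b : PySem.Dict String (PySem.Dict String String)) (p : String × String) :
    PySem.Dict String (PySem.Dict String String) :=
  match p.1.toList with
  | [] => b                                                  -- `if not name: continue`
  | c :: _ =>
    let first : String := String.ofList (PySem.Chars.upper [c])   -- name[0].upper()
    if b.contains first then
      b.modify first PySem.Dict.empty (fun inner => inner.insert p.1 p.2)  -- buckets[first][name] = uid
    else b

def bucket_by_letter (pairs : List (String × String)) : List (String × List (String × String)) :=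
  let buckets0 := pvUpperKeys.foldl (fun d L => d.insert L (PySem.Dict.empty : PySem.Dict String String)) PySem.Dict.empty
  let buckets1 := pvDigitKeys.foldl (fun d dg => d.insert dg PySem.Dict.empty) buckets0
  ((pairs.foldl pvStepA buckets1).items).map (fun kv => (kv.1, kv.2.items))

-- ===== PORT B =====
-- string.ascii_uppercase + string.digits
def pvAllKeys : List Char := "ABCDEFGHIJKLMNOPQRSTUVWXYZ0123456789".toList

-- the inner dict comprehension's accumulator step for key k: `{name: uid for name, uid in pairs if name[:1].upper() == k}`
def pvStepB (k : Char) (d : PySem.Dict String String) (p : String × String) : PySem.Dict String String :=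
  if PySem.Chars.upper (PySem.List.slice p.1.toList none (some 1)) = [k] then d.insert p.1 p.2 else d

def bucket_by_letter_alt (pairs : List (String × String)) : List (String × List (String × String)) :=
  pvAllKeys.map (fun k => (String.ofList [k], (pairs.foldl (pvStepB k) PySem.Dict.empty).items))

-- ===== PRECONDITION & SPEC =====
def Spec_bucket_by_letter (pairs : List (String × String)) (out : List (String × List (String × String))) : Prop := out = bucket_by_letter_alt pairs
instance (pairs : List (String × String)) (out : List (String × List (String × String))) : Decidable (Spec_bucket_by_letter pairs out) := by unfold Spec_bucket_by_letter; infer_instance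

-- ===== CLAIM (what is proved, stated in full; the proofs are below) =====
def Claim_equal_bucket_by_letter : Prop := ∀ (pairs : List (String × String)), Dom_bucket_by_letter pairs → Spec_bucket_by_letter pairs (bucket_by_letter pairs)

-- ===== LEMMAS AND PROOFS =====

theorem pv_ofList_inj (c u : Char) : (String.ofList [c] = String.ofList [u]) ↔ c = u := by
  constructor
  · intro h; have := congrArg String.toList h; simpa using this
  · intro h; rw [h]

-- A's seeded skeleton, as a literal dict over pvAllKeys
theorem pv_seed :
    pvDigitKeys.foldl (fun d dg => d.insert dg PySem.Dict.empty)
      (pvUpperKeys.foldl (fun d L => d.insert L (PySem.Dict.empty : PySem.Dict String String)) PySem.Dict.empty)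
    = PySem.Dict.mk (pvAllKeys.map (fun c => (String.ofList [c], PySem.Dict.empty))) := by
  decide

-- one pair processed by A's loop = every per-key accumulator stepped once
theorem pv_step_comm (ks : List Char) (hk : ks.Nodup) (f : Char → PySem.Dict String String)
    (p : String × String) :
    pvStepA (PySem.Dict.mk (ks.map (fun c => (String.ofList [c], f c)))) p
      = PySem.Dict.mk (ks.map (fun c => (String.ofList [c], pvStepB c (f c) p))) := by
  rcases hcs : p.1.toList with _ | ⟨c0, rest⟩
  · simp only [pvStepA, pvStepB, hcs]
    have h0 : PySem.Chars.upper (PySem.List.slice ([] : List Char) none (some 1)) = ([] : List Char) := by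
      simp [PySem.List.slice, PySem.Chars.upper]
    simp [h0]
  · simp only [pvStepA, pvStepB, hcs]
    have hslice : PySem.List.slice (c0 :: rest) none (some 1) = [c0] := by
      simp [PySem.List.slice]
    have hup : PySem.Chars.upper [c0] = [PySem.Chars.upperChar c0] := by
      simp [PySem.Chars.upper]
    set u := PySem.Chars.upperChar c0 with hu
    have hcond : ∀ c, (PySem.Chars.upper (PySem.List.slice (c0 :: rest) none (some 1)) = [c]) ↔ u = c := by
      intro c; rw [hslice, hup]; simp [eq_comm]
    have hkeys : ((PySem.Dict.mk (ks.map (fun c => (String.ofList [c], f c)))).contains (String.ofList (PySem.Chars.upper [c0]))) = true ↔ u ∈ ks := by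
      rw [hup]
      simp only [PySem.Dict.contains, List.any_map, List.any_eq_true, Function.comp]
      constructor
      · rintro ⟨c, hcks, hbeq⟩
        have hc : c = u := (pv_ofList_inj c u).1 (by simpa using hbeq)
        exact hc ▸ hcks
      · intro h; exact ⟨u, h, by simp⟩
    by_cases hmem : u ∈ ks
    · rw [if_pos (hkeys.2 hmem)]
      have hnd : (PySem.Dict.mk (ks.map (fun c => (String.ofList [c], f c)))).keys.Nodup := by
        have : (PySem.Dict.mk (ks.map (fun c => (String.ofList [c], f c)))).keys
            = ks.map (fun c => String.ofList [c]) := by simp [PySem.Dict.keys]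
        rw [this]
        exact List.Nodup.map (fun a b h => (pv_ofList_inj a b).1 h) hk
      have hget : (PySem.Dict.mk (ks.map (fun c => (String.ofList [c], f c)))).getD (String.ofList (PySem.Chars.upper [c0])) PySem.Dict.empty = f u := by
        rw [hup]
        have hmemit : ((String.ofList [u], f u) : String × PySem.Dict String String)
            ∈ (ks.map (fun c => (String.ofList [c], f c))) := List.mem_map.2 ⟨u, hmem, rfl⟩
        exact PySem.Dict.getD_of_mem_items _ hmemit hnd _
      rw [PySem.Dict.modify, hget]
      rw [PySem.Dict.insert, if_pos (hkeys.2 hmem)]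
      congr 1
      simp only [List.map_map]
      refine List.map_congr_left ?_
      intro c _
      simp only [Function.comp]
      by_cases hc : c = u
      · subst hc
        simp [hup, hcond]
      · have h1 : ¬ (String.ofList [c] == String.ofList (PySem.Chars.upper [c0])) = true := by
          rw [hup]; simpa [pv_ofList_inj] using hc
        have h2 : ¬ u = c := fun h => hc h.symm
        simp [h1, hcond, h2]
    · rw [if_neg (fun h => hmem (hkeys.1 h))]
      congr 1
      refine (List.map_congr_left ?_).symm
      intro c hcks
      have : ¬ u = c := fun h => hmem (h ▸ hcks)
      simp [hcond, this]

-- the whole loop, generalized over the per-key contents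
theorem pv_fold_comm (ks : List Char) (hk : ks.Nodup) (pairs : List (String × String))
    (f : Char → PySem.Dict String String) :
    pairs.foldl pvStepA (PySem.Dict.mk (ks.map (fun c => (String.ofList [c], f c))))
      = PySem.Dict.mk (ks.map (fun c => (String.ofList [c], pairs.foldl (pvStepB c) (f c)))) := by
  induction pairs generalizing f with
  | nil => rfl
  | cons p ps ih =>
    simp only [List.foldl_cons, pv_step_comm ks hk f p, ih (fun c => pvStepB c (f c) p)]

-- ===== VERDICT (by name: the statement is the Claim_ definition above) =====
theorem bucket_by_letter_spec : Claim_equal_bucket_by_letter := by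
  intro pairs _
  show bucket_by_letter pairs = bucket_by_letter_alt pairs
  unfold bucket_by_letter bucket_by_letter_alt
  dsimp only
  rw [pv_seed, pv_fold_comm pvAllKeys (by decide) pairs (fun _ => PySem.Dict.empty)]
  simp [List.map_map, Function.comp]
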